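-- pv_equiv track=rewrite | github.com/boniiilla/asix_programacion | UF2/mes_a/mes_a.py | contador_a
-- ===== SOURCE A (Python) =====
-- def contador_a(frases_guardadas):
--     max_a_en_frase = 0
--     frase_con_mas_a = ""
--     for frase in frases_guardadas:
--         a_en_frase = 0
--         for letra in range(len(frase)):
--             if frase[letra].casefold() == "a":
--                 a_en_frase += 1
--         if a_en_frase > max_a_en_frase:
--             max_a_en_frase = a_en_frase
--             frase_con_mas_a = frase
--     return max_a_en_frase, frase_con_mas_a
-- ===== SOURCE B (Python) =====
-- def contador_a(frases_guardadas):
--     counts = [sum(ch in "aA" for ch in frase) for frase in frases_guardadas]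
--     mejor = max(counts, default=0)
--     if mejor == 0:
--         return 0, ""
--     return mejor, frases_guardadas[counts.index(mejor)]
-- ===== Notes on version B (the rewrite author's own statement) =====
-- stated objective: simpler
-- what changed: Replaces A's running-(max,best) accumulator loop with index arithmetic by a count table built by one comprehension over characters, then a plain max plus first-index lookup; strict-> tie-breaking (earliest phrase wins, empty result when no phrase contains an a/A) is preserved.
import Mathlib
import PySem

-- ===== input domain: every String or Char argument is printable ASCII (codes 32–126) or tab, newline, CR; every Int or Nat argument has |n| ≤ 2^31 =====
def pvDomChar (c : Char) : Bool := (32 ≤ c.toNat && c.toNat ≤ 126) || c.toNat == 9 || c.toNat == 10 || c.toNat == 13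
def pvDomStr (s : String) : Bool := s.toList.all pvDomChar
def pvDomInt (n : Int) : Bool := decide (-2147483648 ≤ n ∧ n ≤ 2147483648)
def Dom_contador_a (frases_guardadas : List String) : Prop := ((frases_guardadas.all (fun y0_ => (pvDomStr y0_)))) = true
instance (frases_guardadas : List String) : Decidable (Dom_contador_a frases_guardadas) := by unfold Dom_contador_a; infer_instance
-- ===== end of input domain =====

-- B replaces A's running-(max,best) accumulator loop by a count table plus max and first-index lookup (same cost, plainer decomposition); return values proved equal.

-- ===== PORT A =====
-- inner loop 'for letra in range(len(frase)): if frase[letra].casefold() == "a"':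
-- casefold of a single ASCII char equals lowerChar (exact on the printable-ASCII domain);
-- the 'none' branch of pyGet? is unreachable (letra ranges over range(len(frase))).
def contadorA_cuenta (cs : List Char) : Int :=
  (PySem.List.pyRange 0 (cs.length : Int) 1).foldl
    (fun a_en_frase letra =>
      match PySem.List.pyGet? cs letra with
      | some c => if PySem.Chars.lowerChar c = 'a' then a_en_frase + 1 else a_en_frase
      | none => a_en_frase)
    0

def contador_a (frases_guardadas : List String) : Int × String :=
  frases_guardadas.foldl
    (fun st frase =>
      let a_en_frase := contadorA_cuenta frase.toList
      if a_en_frase > st.1 then (a_en_frase, frase) else st)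
    (0, "")

-- ===== PORT B =====
-- sum(ch in "aA" for ch in frase)
def altCount (frase : String) : Int :=
  frase.toList.foldl (fun acc ch => acc + (if ch = 'a' ∨ ch = 'A' then 1 else 0)) 0

-- counts table, max(counts, default=0), then frases[counts.index(mejor)];
-- the 'none' branches are unreachable (mejor ≠ 0 implies mejor ∈ counts and the index is in range).
def contador_a_alt (frases_guardadas : List String) : Int × String :=
  let counts := frases_guardadas.map altCount
  let mejor := (PySem.List.max? counts (fun y => y)).getD 0
  if mejor = 0 then (0, "")
  else
    match PySem.List.index? counts mejor with
    | some i => (mejor, (PySem.List.pyGet? frases_guardadas (i : Int)).getD "")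
    | none => (mejor, "")

-- ===== PRECONDITION & SPEC =====
def Spec_contador_a (frases_guardadas : List String) (out : Int × String) : Prop := out = contador_a_alt frases_guardadas
instance (frases_guardadas : List String) (out : Int × String) : Decidable (Spec_contador_a frases_guardadas out) := by unfold Spec_contador_a; infer_instance

-- ===== CLAIM (what is proved, stated in full; the proofs are below) =====
def Claim_equal_contador_a : Prop := ∀ (frases_guardadas : List String), Dom_contador_a frases_guardadas → Spec_contador_a frases_guardadas (contador_a frases_guardadas)

-- ===== LEMMAS AND PROOFS =====

-- casefold/lower of one char hits 'a' exactly for 'a' and 'A'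
theorem lowerChar_eq_a (c : Char) : (PySem.Chars.lowerChar c = 'a') ↔ (c = 'a' ∨ c = 'A') := by
  unfold PySem.Chars.lowerChar PySem.Chars.isupper
  split_ifs with h
  · simp only [Bool.and_eq_true, decide_eq_true_eq] at h
    have hn : 65 ≤ c.toNat ∧ c.toNat ≤ 90 := ⟨h.1, h.2⟩
    constructor
    · intro he
      have h2 : (Char.ofNat (c.toNat + 32)).toNat = 97 := by rw [he]; rfl
      have h3 : (Char.ofNat (c.toNat + 32)).toNat = c.toNat + 32 := by
        rw [Char.toNat_ofNat, if_pos]; left; omega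
      right
      apply Char.ext; apply UInt32.toNat_inj.mp
      show c.toNat = ('A' : Char).toNat
      have : ('A' : Char).toNat = 65 := rfl
      omega
    · rintro (rfl | rfl)
      · exfalso
        have : ('a' : Char).toNat = 97 := rfl
        omega
      · rfl
  · simp only [Bool.and_eq_true, decide_eq_true_eq, not_and_or] at h
    constructor
    · intro he; left; exact he
    · rintro (rfl | rfl)
      · rfl
      · exfalso
        rcases h with h | h
        · exact h (by decide)
        · exact h (by decide)

-- A's index loop over range(len(frase)) computes the per-character fold (with A's predicate)
theorem cuentaA_eq_gen (cs : List Char) :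
    contadorA_cuenta cs
      = cs.foldl (fun acc ch => acc + (if PySem.Chars.lowerChar ch = 'a' then 1 else 0)) 0 := by
  unfold contadorA_cuenta
  induction cs using List.reverseRecOn with
  | nil => rfl
  | append_singleton cs c ih =>
    have hlen : ((cs ++ [c]).length : Int) = (cs.length : Int) + 1 := by simp
    rw [hlen, PySem.List.pyRange_one_succ_right (by positivity), List.foldl_append, List.foldl_append]
    have hcong : ∀ (acc : Int), ∀ x ∈ PySem.List.pyRange 0 (cs.length : Int),
        (fun a_en_frase letra =>
          match PySem.List.pyGet? (cs ++ [c]) letra with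
          | some c => if PySem.Chars.lowerChar c = 'a' then a_en_frase + 1 else a_en_frase
          | none => a_en_frase) acc x
        = (fun a_en_frase letra =>
          match PySem.List.pyGet? cs letra with
          | some c => if PySem.Chars.lowerChar c = 'a' then a_en_frase + 1 else a_en_frase
          | none => a_en_frase) acc x := by
      intro acc x hx
      rw [PySem.List.mem_pyRange_one] at hx
      have h0 : PySem.List.pyGet? (cs ++ [c]) x = PySem.List.pyGet? cs x := by
        rw [PySem.List.pyGet?_of_nonneg _ hx.1, PySem.List.pyGet?_of_nonneg _ hx.1,
            List.getElem?_append_left]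
        omega
      simp only [h0]
    rw [PySem.List.foldl_congr_mem _ _ _ _ hcong, ih]
    simp only [List.foldl_cons, List.foldl_nil, PySem.List.pyGet?_append_length cs [] c]
    split_ifs <;> omega

-- A's count equals B's count
theorem cuentaA_eq (s : String) : contadorA_cuenta s.toList = altCount s := by
  rw [cuentaA_eq_gen]
  unfold altCount
  apply PySem.List.foldl_congr_mem
  intro acc x _
  simp only [lowerChar_eq_a]

-- the recursive selection both programs compute
def selSpec : List String → Int × String
  | [] => (0, "")
  | f :: rest =>
      let r := selSpec rest
      if altCount f ≥ r.1 ∧ 0 < altCount f then (altCount f, f) else r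

theorem count_foldl_ge (cs : List Char) : ∀ acc : Int,
    acc ≤ cs.foldl (fun acc ch => acc + (if ch = 'a' ∨ ch = 'A' then 1 else 0)) acc := by
  induction cs with
  | nil => intro acc; simp
  | cons c cs ih =>
    intro acc
    simp only [List.foldl_cons]
    have h1 : acc ≤ acc + (if c = 'a' ∨ c = 'A' then 1 else 0) := by split_ifs <;> omega
    exact le_trans h1 (ih _)

theorem altCount_nonneg (s : String) : 0 ≤ altCount s := count_foldl_ge s.toList 0

theorem selSpec_fst_nonneg (l : List String) : 0 ≤ (selSpec l).1 := by
  induction l with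
  | nil => simp [selSpec]
  | cons f rest ih =>
    simp only [selSpec]
    split_ifs with h
    · exact le_of_lt h.2
    · exact ih

theorem selSpec_of_fst_le_zero (l : List String) (h : (selSpec l).1 ≤ 0) : selSpec l = (0, "") := by
  induction l with
  | nil => rfl
  | cons f rest ih =>
    simp only [selSpec] at h ⊢
    split_ifs at h ⊢ with hc
    · exfalso; omega
    · exact ih h

theorem foldAlt_eq_selSpec (l : List String) : ∀ (m : Int) (b : String), 0 ≤ m →
    l.foldl
      (fun st frase =>
        if altCount frase > st.1 then (altCount frase, frase) else st) (m, b)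
      = if (selSpec l).1 > m then selSpec l else (m, b) := by
  induction l with
  | nil =>
    intro m b hm
    simp only [List.foldl_nil, selSpec]
    rw [if_neg (by omega)]
  | cons f rest ih =>
    intro m b hm
    simp only [List.foldl_cons]
    have hc0 : 0 ≤ altCount f := altCount_nonneg f
    have hr0 : 0 ≤ (selSpec rest).1 := selSpec_fst_nonneg rest
    by_cases hcm : altCount f > m
    · rw [if_pos hcm, ih (altCount f) f hc0]
      simp only [selSpec]
      by_cases hr : altCount f ≥ (selSpec rest).1 ∧ 0 < altCount f
      · rw [if_pos hr, if_neg (by omega), if_pos (by simpa using (by omega : altCount f > m))]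
      · have hr1 : (selSpec rest).1 > altCount f := by omega
        rw [if_neg hr, if_pos hr1, if_pos (by omega)]
    · rw [if_neg hcm, ih m b hm]
      simp only [selSpec]
      by_cases hr : altCount f ≥ (selSpec rest).1 ∧ 0 < altCount f
      · rw [if_pos hr, if_neg (by omega), if_neg (by simp; omega)]
      · rw [if_neg hr]

-- A's fold is the altCount fold (per-phrase counts agree)
theorem foldA_eq_selSpec (l : List String) (m : Int) (b : String) (hm : 0 ≤ m) :
    l.foldl
      (fun st frase =>
        let a_en_frase := contadorA_cuenta frase.toList
        if a_en_frase > st.1 then (a_en_frase, frase) else st) (m, b)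
      = if (selSpec l).1 > m then selSpec l else (m, b) := by
  rw [PySem.List.foldl_congr_mem _ _
      (fun st frase => if altCount frase > st.1 then (altCount frase, frase) else st) _
      (by intro acc x _; simp only [cuentaA_eq])]
  exact foldAlt_eq_selSpec l m b hm

-- max(counts) of a cons, via the running max
theorem max_getD_cons (c0 : Int) (cs : List Int) (h0 : 0 ≤ c0) (h : ∀ x ∈ cs, 0 ≤ x) :
    ((PySem.List.max? (c0 :: cs) (fun y => y)).getD 0)
      = max c0 ((PySem.List.max? cs (fun y => y)).getD 0) := by
  rw [PySem.List.max?_id_cons]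
  cases cs with
  | nil => simp [PySem.List.max?]; omega
  | cons c1 t =>
    rw [PySem.List.max?_id_cons]
    simp only [Option.getD_some, List.foldl_cons]
    have hassoc : ∀ (t : List Int) (a b : Int), t.foldl max (max a b) = max a (t.foldl max b) := by
      intro t
      induction t with
      | nil => intro a b; rfl
      | cons x t iht =>
        intro a b
        simp only [List.foldl_cons, max_assoc, iht]
    exact hassoc t c0 c1

theorem mejor_nonneg (l : List String) :
    0 ≤ ((PySem.List.max? (l.map altCount) (fun y => y)).getD 0) := by
  cases hm : PySem.List.max? (l.map altCount) (fun y => y) with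
  | none => simp
  | some v =>
    have hv := PySem.List.max?_mem hm
    simp only [List.mem_map] at hv
    obtain ⟨x, _, rfl⟩ := hv
    simpa using altCount_nonneg x

theorem counts_nonneg (l : List String) : ∀ x ∈ l.map altCount, 0 ≤ x := by
  intro x hx
  simp only [List.mem_map] at hx
  obtain ⟨s, _, rfl⟩ := hx
  exact altCount_nonneg s

theorem selSpec_fst (l : List String) :
    (selSpec l).1 = ((PySem.List.max? (l.map altCount) (fun y => y)).getD 0) := by
  induction l with
  | nil => simp [selSpec, PySem.List.max?]
  | cons f rest ih =>
    rw [List.map_cons, max_getD_cons (altCount f) _ (altCount_nonneg f) (counts_nonneg rest)]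
    simp only [selSpec]
    rw [← ih]
    have hc0 : 0 ≤ altCount f := altCount_nonneg f
    have hr0 : 0 ≤ (selSpec rest).1 := selSpec_fst_nonneg rest
    split_ifs with h
    · rw [max_eq_left h.1]
    · have : altCount f ≤ (selSpec rest).1 ∨ altCount f = 0 := by omega
      rcases this with h1 | h1
      · rw [max_eq_right h1]
      · rw [h1, max_eq_right hr0]

theorem alt_eq_selSpec (l : List String) : contador_a_alt l = selSpec l := by
  induction l with
  | nil => rfl
  | cons f rest ih =>
    unfold contador_a_alt
    simp only [List.map_cons]
    rw [max_getD_cons (altCount f) _ (altCount_nonneg f) (counts_nonneg rest)]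
    have hc0 : 0 ≤ altCount f := altCount_nonneg f
    have hM0 : 0 ≤ ((PySem.List.max? (rest.map altCount) (fun y => y)).getD 0) := mejor_nonneg rest
    set c := altCount f with hcdef
    set M := ((PySem.List.max? (rest.map altCount) (fun y => y)).getD 0) with hMdef
    by_cases h0 : max c M = 0
    · rw [if_pos h0]
      have hc : c = 0 := by have := le_max_left c M; omega
      have hM : M = 0 := by have := le_max_right c M; omega
      simp only [selSpec]
      rw [if_neg (by rw [← hcdef]; omega)]
      have : (selSpec rest).1 ≤ 0 := by rw [selSpec_fst, ← hMdef]; omega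
      exact (selSpec_of_fst_le_zero rest this).symm
    · rw [if_neg h0]
      by_cases hcw : M ≤ c
      · -- first phrase wins
        rw [max_eq_left hcw]
        rw [PySem.List.index?_cons_self]
        simp only [Int.natCast_zero, PySem.List.pyGet?_zero_cons, Option.getD_some]
        have hcpos : 0 < c := by have := max_eq_left hcw; omega
        simp only [selSpec]
        rw [if_pos (by rw [← hcdef]; exact ⟨by rw [selSpec_fst, ← hMdef]; omega, hcpos⟩)]
      · -- some later phrase wins; B's lookup steps into the tail, selSpec recurses
        rw [not_le] at hcw
        rw [max_eq_right (le_of_lt hcw)]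
        have hMpos : 0 < M := by omega
        have hsome : ∃ v, PySem.List.max? (rest.map altCount) (fun y => y) = some v := by
          cases hm : PySem.List.max? (rest.map altCount) (fun y => y) with
          | none =>
            rw [PySem.List.max?_eq_none_iff] at hm
            rw [hMdef, hm] at hMpos
            simp [PySem.List.max?] at hMpos
          | some v => exact ⟨v, rfl⟩
        obtain ⟨v, hv⟩ := hsome
        have hvM : v = M := by rw [hMdef, hv]; rfl
        have hMmem : M ∈ rest.map altCount := by rw [← hvM]; exact PySem.List.max?_mem hv
        have hidx : ∃ j, PySem.List.index? (rest.map altCount) M = some j := by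
          cases hj : PySem.List.index? (rest.map altCount) M with
          | none =>
            rw [PySem.List.index?_eq_none_iff] at hj
            exact absurd hMmem hj
          | some j => exact ⟨j, rfl⟩
        obtain ⟨j, hj⟩ := hidx
        rw [PySem.List.index?_cons_of_ne _ (by omega), hj]
        simp only [Option.map_some]
        have hstep : PySem.List.pyGet? (f :: rest) ((j + 1 : Nat) : Int)
            = PySem.List.pyGet? rest (j : Int) := by
          push_cast
          exact PySem.List.pyGet?_cons_succ f rest j
        rw [hstep]
        -- selSpec recurses, and B on rest computes the same pair
        simp only [selSpec]
        rw [if_neg (by rw [← hcdef, selSpec_fst, ← hMdef]; omega)]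
        rw [← ih]
        unfold contador_a_alt
        simp only [← hMdef, if_neg (by omega : ¬ M = 0), hj]

-- ===== VERDICT (by name: the statement is the Claim_ definition above) =====
theorem contador_a_spec : Claim_equal_contador_a := by
  intro l _
  unfold Spec_contador_a
  rw [alt_eq_selSpec]
  unfold contador_a
  rw [foldA_eq_selSpec l 0 "" le_rfl]
  split_ifs with h
  · rfl
  · exact (selSpec_of_fst_le_zero l (by omega)).symm
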